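-- pv_equiv track=rewrite | github.com/leetaewoo123/algorithm | 프로그래머스/lv0/120853. 컨트롤 제트/컨트롤 제트.py | solution
-- ===== SOURCE A (Python) =====
-- def solution(s):
--     s = s.split(" ")
--     n = []
--     for i in s:
--         if i=="Z" and len(n)>= 1:
--             n.append(n[-1]*-1)
--         else :
--             n.append(int(i))
--     return sum(n)
-- ===== SOURCE B (Python) =====
-- def solution(s):
--     # run-based closed form: a value followed by k consecutive "Z"s contributes
--     # itself iff k is even (the Z-run sign-toggles it, cancelling in pairs)
--     toks = s.split(" ")
--     total = 0
--     i = 0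
--     n = len(toks)
--     while i < n:
--         v = int(toks[i])
--         j = i + 1
--         while j < n and toks[j] == "Z":
--             j += 1
--         if (j - i - 1) % 2 == 0:
--             total += v
--         i = j
--     return total
-- ===== Notes on version B (the rewrite author's own statement) =====
-- stated objective: alternative
-- what changed: Instead of simulating the Z-cancellation token by token into a list and summing, B groups tokens into value+Z-run blocks and uses the closed form that a value followed by k Z's contributes itself iff k is even, never materialising the cancelled values.
import Mathlib
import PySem

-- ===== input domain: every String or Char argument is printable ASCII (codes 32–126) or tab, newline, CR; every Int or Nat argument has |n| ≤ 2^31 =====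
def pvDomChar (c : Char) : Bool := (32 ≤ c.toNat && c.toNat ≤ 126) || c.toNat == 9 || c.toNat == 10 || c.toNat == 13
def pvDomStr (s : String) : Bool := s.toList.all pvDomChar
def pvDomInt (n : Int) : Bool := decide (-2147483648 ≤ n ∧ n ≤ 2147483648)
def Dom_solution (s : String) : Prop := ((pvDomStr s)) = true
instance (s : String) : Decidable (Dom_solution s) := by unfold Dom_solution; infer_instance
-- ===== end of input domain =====

-- B replaces A's token-by-token list simulation by a run-grouped closed form:
-- a value followed by k consecutive "Z"s contributes itself iff k is even.

-- ===== PORT A =====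
-- one loop iteration of A; the Option threads int()'s ValueError (none = raised)
def solAStep (acc : Option (List Int)) (i : String) : Option (List Int) :=
  match acc with
  | none => none
  | some n =>
    if i == "Z" && decide (1 ≤ n.length) then
      match PySem.List.pyGet? n (-1) with
      | some v => some (n ++ [v * -1])
      | none => none
    else (PySem.Int.ofStr? i).map (fun v => n ++ [v])

def solution (s : String) : Int :=
  match (((PySem.Str.split? s " ").getD [])).foldl solAStep (some []) with
  | some n => n.foldl (· + ·) 0
  | none => 0          -- unreachable under Pre_solution (Python raises ValueError there)

-- ===== PORT B =====
-- B's outer while loop: take the value at the head, skip its run of "Z"s,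
-- add the value iff the run length is even; Option threads int()'s ValueError
def solBGo : List String → Option Int
  | [] => some 0
  | t :: rest =>
    match PySem.Int.ofStr? t with
    | none => none
    | some v =>
      let k := (rest.takeWhile (· == "Z")).length
      (solBGo (rest.dropWhile (· == "Z"))).map
        (fun r => (if k % 2 = 0 then v else 0) + r)
termination_by l => l.length
decreasing_by
  exact Nat.lt_succ_of_le (List.length_dropWhile_le _ _)

def solution_alt (s : String) : Int :=
  match solBGo (((PySem.Str.split? s " ").getD [])) with
  | some t => t
  | none => 0          -- unreachable under Pre_solution

-- ===== PRECONDITION & SPEC =====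
-- Pre_ excludes exactly the inputs where Python A raises ValueError: a token that is
-- neither a non-first "Z" nor a valid int literal (e.g. a leading "Z", or "" from "1  2").
def Pre_solution (s : String) : Prop :=
  ((((PySem.Str.split? s " ").getD [])).zipIdx.all
    (fun p => (decide (p.2 ≠ 0) && (p.1 == "Z")) || (PySem.Int.ofStr? p.1).isSome)) = true
instance (s : String) : Decidable (Pre_solution s) := by unfold Pre_solution; infer_instance

def pvWitness_solution : String := "1 Z 2"

def Spec_solution (s : String) (out : Int) : Prop := out = solution_alt s
instance (s : String) (out : Int) : Decidable (Spec_solution s out) := by unfold Spec_solution; infer_instance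

-- ===== CLAIM (what is proved, stated in full; the proofs are below) =====
def Claim_equal_solution : Prop := ∀ (s : String), Dom_solution s → Pre_solution s → Spec_solution s (solution s)

-- ===== LEMMAS AND PROOFS =====

theorem foldl_add_shift : ∀ (l : List Int) (a : Int),
    l.foldl (· + ·) a = a + l.foldl (· + ·) 0 := by
  intro l
  induction l with
  | nil => simp
  | cons x t iht =>
    intro a
    rw [List.foldl_cons, List.foldl_cons, iht (a + x), iht (0 + x)]
    ring

theorem isum_append (a b : List Int) :
    (a ++ b).foldl (· + ·) 0 = a.foldl (· + ·) 0 + b.foldl (· + ·) 0 := by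
  rw [List.foldl_append, foldl_add_shift]

-- the alternating list A appends while processing a run of k "Z"s after last value v
def zrun (v : Int) : Nat → List Int
  | 0 => []
  | k + 1 => (-v) :: zrun (-v) k

theorem zrun_sum : ∀ (k : Nat) (v : Int),
    (zrun v k).foldl (· + ·) 0 = if k % 2 = 0 then 0 else -v := by
  intro k
  induction k with
  | zero => intro v; simp [zrun]
  | succ k ih =>
    intro v
    simp only [zrun, List.foldl_cons]
    rw [foldl_add_shift, ih (-v)]
    rcases Nat.even_or_odd k with hk | hk
    · have h1 : k % 2 = 0 := Nat.even_iff.mp hk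
      have h2 : (k + 1) % 2 = 1 := by omega
      simp [h1, h2]
    · have h1 : k % 2 = 1 := Nat.odd_iff.mp hk
      have h2 : (k + 1) % 2 = 0 := by omega
      simp [h1, h2]

theorem foldA_none (l : List String) : l.foldl solAStep none = none := by
  induction l <;> simp [solAStep, *]

-- processing k "Z"s from a state ending in v appends zrun v k
theorem foldA_replicateZ : ∀ (k : Nat) (m : List Int) (v : Int),
    (List.replicate k "Z").foldl solAStep (some (m ++ [v])) =
      some (m ++ [v] ++ zrun v k) := by
  intro k
  induction k with
  | zero => intro m v; simp [zrun]
  | succ k ih =>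
    intro m v
    have hget : PySem.List.pyGet? (m ++ [v]) (-1) = some v := by
      simp [PySem.List.pyGet?, PySem.List.pyIdx?]
    have hstep : solAStep (some (m ++ [v])) "Z" = some ((m ++ [v]) ++ [-v]) := by
      simp [solAStep, hget]
    rw [List.replicate_succ, List.foldl_cons, hstep]
    have := ih (m ++ [v]) (-v)
    simp only [List.append_assoc] at this ⊢
    simpa [zrun] using this

-- main invariant: B's run-grouped pass computes A's total increment over the
-- remaining tokens, provided the remaining tokens do not start with "Z"
theorem main_inv : ∀ (N : Nat) (l : List String), l.length ≤ N →
    l.head? ≠ some "Z" →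
    ∀ (n : List Int),
      solBGo l = ((l.foldl solAStep (some n)).map
        (fun nn => nn.foldl (· + ·) 0 - n.foldl (· + ·) 0)) := by
  intro N
  induction N with
  | zero =>
    intro l hl _ n
    have : l = [] := List.eq_nil_of_length_eq_zero (Nat.le_zero.mp hl)
    subst this; simp [solBGo]
  | succ N ih =>
    intro l hl hhd n
    match l with
    | [] => simp [solBGo]
    | t :: rest =>
      have ht : t ≠ "Z" := by simpa using hhd
      rw [solBGo]
      cases hint : PySem.Int.ofStr? t with
      | none =>
        have hstep : solAStep (some n) t = none := by
          simp [solAStep, ht, hint]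
        simp [List.foldl_cons, hstep, foldA_none]
      | some w =>
        have hstep : solAStep (some n) t = some (n ++ [w]) := by
          simp [solAStep, ht, hint]
        set tk := rest.takeWhile (· == "Z") with htk
        set dr := rest.dropWhile (· == "Z") with hdr
        have hrest : tk ++ dr = rest := List.takeWhile_append_dropWhile
        have htkrep : tk = List.replicate tk.length "Z" := by
          rw [List.eq_replicate_iff]
          refine ⟨rfl, ?_⟩
          intro b hb
          have := List.mem_takeWhile_imp hb
          simpa using this
        have hdrhd : dr.head? ≠ some "Z" := by
          intro h
          have := List.head?_dropWhile_not (· == "Z") rest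
          rw [← hdr, h] at this
          simp at this
        have hzfold : tk.foldl solAStep (some (n ++ [w])) =
            some (n ++ [w] ++ zrun w tk.length) := by
          conv_lhs => rw [htkrep]
          exact foldA_replicateZ tk.length n w
        have hlen : dr.length ≤ N := by
          have h1 : dr.length ≤ rest.length := List.length_dropWhile_le _ _
          have h2 : (t :: rest).length ≤ N + 1 := hl
          simp at h2; omega
        have hih := ih dr hlen hdrhd (n ++ [w] ++ zrun w tk.length)
        have hAfold : (t :: rest).foldl solAStep (some n) =
            dr.foldl solAStep (some (n ++ [w] ++ zrun w tk.length)) := by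
          rw [List.foldl_cons, hstep, ← hrest, List.foldl_append, hzfold]
        rw [hAfold, hih]
        cases hres : dr.foldl solAStep (some (n ++ [w] ++ zrun w tk.length)) with
        | none => simp
        | some nn =>
          simp only [Option.map_some]
          congr 1
          have hsum : (n ++ [w] ++ zrun w tk.length).foldl (· + ·) 0 =
              n.foldl (· + ·) 0 + w + (if tk.length % 2 = 0 then 0 else -w) := by
            rw [isum_append, isum_append, zrun_sum]
            simp
          rw [hsum]
          split_ifs <;> ring

theorem ofStr_Z_none : PySem.Int.ofStr? "Z" = none := by decide

-- ===== VERDICT (by name: the statement is the Claim_ definition above) =====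
theorem solution_spec : Claim_equal_solution := by
  intro s _ _
  unfold Spec_solution solution solution_alt
  set l := ((PySem.Str.split? s " ").getD []) with hltok
  by_cases hhd : l.head? = some "Z"
  · -- leading "Z": int("Z") fails in both ports (both fall back to 0)
    match hl : l with
    | [] => simp at hhd
    | t :: rest =>
      have ht : t = "Z" := by simpa using hhd
      subst ht
      have hstep : solAStep (some ([] : List Int)) "Z" = none := by
        simp [solAStep, ofStr_Z_none]
      rw [List.foldl_cons, hstep, foldA_none, solBGo, ofStr_Z_none]
  · have h := main_inv l.length l le_rfl hhd ([] : List Int)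
    rw [h]
    cases l.foldl solAStep (some []) <;> simp
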